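-- pv_equiv track=rewrite | github.com/sofia5/adventOfCode | 2020/Day6/quiz2.py | getYesResponses
-- ===== SOURCE A (Python) =====
-- def getYesResponses(answers):
--     yesAnswers = []
--     numOfPeople = len(answers)
--     allAnswers = ''.join(answers)
--
--     for question in allAnswers:
--         if question not in yesAnswers:
--             if numOfPeople == allAnswers.count(question):
--                 yesAnswers.append(question)
--
--     return(len(yesAnswers))
-- ===== SOURCE B (Python) =====
-- def getYesResponses(answers):
--     n = len(answers)
--     s = sorted(''.join(answers))
--     m = len(s)
--     total = 0
--     i = 0
--     while i < m:
--         j = i + 1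
--         while j < m and s[j] == s[i]:
--             j += 1
--         if j - i == n:
--             total += 1
--         i = j
--     return total
-- ===== Notes on version B (the rewrite author's own statement) =====
-- stated objective: faster
-- what changed: Instead of scanning the joined string with repeated str.count passes and a membership list, B sorts the concatenation once and makes a single scan over maximal runs of equal characters, counting runs whose length equals len(answers).
import Mathlib
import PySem

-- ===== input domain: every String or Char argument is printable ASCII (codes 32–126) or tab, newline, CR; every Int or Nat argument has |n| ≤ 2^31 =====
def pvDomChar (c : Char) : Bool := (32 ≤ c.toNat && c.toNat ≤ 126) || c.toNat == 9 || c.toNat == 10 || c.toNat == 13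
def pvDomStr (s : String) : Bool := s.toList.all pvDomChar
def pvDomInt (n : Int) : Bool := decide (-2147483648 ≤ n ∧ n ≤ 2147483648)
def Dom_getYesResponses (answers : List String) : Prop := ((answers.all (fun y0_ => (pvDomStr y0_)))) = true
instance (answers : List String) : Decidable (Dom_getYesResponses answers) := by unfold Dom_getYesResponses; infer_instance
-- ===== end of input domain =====

-- B sorts the concatenated answers once and counts maximal runs of equal characters whose
-- length equals len(answers), replacing A's repeated str.count scans (objective: faster).

-- ===== PORT A =====
def getYesResponses (answers : List String) : Int :=
  let numOfPeople := answers.length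
  let allAnswers := (PySem.Str.join "" answers).toList
  -- 'allAnswers.count(question)': question is a single character, so str.count is exactly
  -- the character's frequency in the string — PySem.List.count on the char list (exact here).
  let yesAnswers := allAnswers.foldl (fun ys question =>
    if !(ys.contains question) then
      if numOfPeople == PySem.List.count allAnswers question then ys ++ [question] else ys
    else ys) ([] : List Char)
  (yesAnswers.length : Int)

-- ===== PORT B =====
-- inner 'while j < m and s[j] == s[i]: j += 1' loop of Source B: advances j past the run of c
def runEnd (s : List Char) (c : Char) (j : Nat) : Nat :=
  if h : j < s.length then
    if s[j]'h == c then runEnd s c (j + 1) else j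
  else j
termination_by s.length - j

-- cited by scanFrom's decreasing_by: the inner loop never moves j backwards
theorem runEnd_ge (s : List Char) (c : Char) (j : Nat) : j ≤ runEnd s c j := by
  fun_induction runEnd <;> omega

-- outer 'while i < m:' loop of Source B, accumulating total
def scanFrom (s : List Char) (n : Nat) (i : Nat) : Int :=
  if h : i < s.length then
    (if runEnd s (s[i]'h) (i + 1) - i == n then 1 else 0)
      + scanFrom s n (runEnd s (s[i]'h) (i + 1))
  else 0
termination_by s.length - i
decreasing_by have := runEnd_ge s (s[i]'h) (i + 1); omega

def getYesResponses_alt (answers : List String) : Int :=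
  scanFrom (PySem.List.sorted ((PySem.Str.join "" answers).toList) (fun x => x) false)
    answers.length 0

-- ===== PRECONDITION & SPEC =====
def Spec_getYesResponses (answers : List String) (out : Int) : Prop := out = getYesResponses_alt answers
instance (answers : List String) (out : Int) : Decidable (Spec_getYesResponses answers out) := by unfold Spec_getYesResponses; infer_instance

-- ===== CLAIM (what is proved, stated in full; the proofs are below) =====
def Claim_equal_getYesResponses : Prop := ∀ (answers : List String), Dom_getYesResponses answers → Spec_getYesResponses answers (getYesResponses answers)

-- ===== LEMMAS AND PROOFS =====

-- proof-side intermediate: Source B's scan written as structural recursion on the list suffix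
def runScan (n : Nat) (l : List Char) : Int :=
  match l with
  | [] => 0
  | c :: t =>
    (if (t.takeWhile (fun x => x == c)).length + 1 == n then 1 else 0)
      + runScan n (t.dropWhile (fun x => x == c))
termination_by l.length
decreasing_by simpa using Nat.lt_succ_of_le (List.length_dropWhile_le _ _)

-- the index-based inner loop computes i + 1 + (length of the run after position i)
theorem runEnd_spec (s : List Char) (c : Char) (j : Nat) :
    runEnd s c j = j + ((s.drop j).takeWhile (fun x => x == c)).length := by
  fun_induction runEnd with
  | case1 j h hc ih =>
    rw [ih, List.drop_eq_getElem_cons h, List.takeWhile_cons]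
    simp only [hc, if_true, List.length_cons]
    omega
  | case2 j h hc =>
    rw [List.drop_eq_getElem_cons h, List.takeWhile_cons]
    simp [hc]
  | case3 j h =>
    rw [List.drop_of_length_le (Nat.le_of_not_lt h)]
    simp

-- the index-based outer loop is the structural run scan on the suffix
theorem scanFrom_eq (s : List Char) (n : Nat) (i : Nat) :
    scanFrom s n i = runScan n (s.drop i) := by
  fun_induction scanFrom with
  | case1 i h ih =>
    have hre := runEnd_spec s (s[i]'h) (i + 1)
    have hdrop : (s.drop (i + 1)).drop ((s.drop (i + 1)).takeWhile (fun x => x == s[i]'h)).length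
        = (s.drop (i + 1)).dropWhile (fun x => x == s[i]'h) := by
      have h1 := List.drop_left
        (l₁ := (s.drop (i + 1)).takeWhile (fun x => x == s[i]'h))
        (l₂ := (s.drop (i + 1)).dropWhile (fun x => x == s[i]'h))
      rw [List.takeWhile_append_dropWhile] at h1
      exact h1
    have hdw : s.drop (runEnd s (s[i]'h) (i + 1))
        = (s.drop (i + 1)).dropWhile (fun x => x == s[i]'h) := by
      rw [hre, ← List.drop_drop, hdrop]
    have hsub : runEnd s (s[i]'h) (i + 1) - i
        = ((s.drop (i + 1)).takeWhile (fun x => x == s[i]'h)).length + 1 := by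
      omega
    rw [List.drop_eq_getElem_cons h, runScan, ih, hdw, hsub]
  | case2 i h =>
    rw [List.drop_of_length_le (Nat.le_of_not_lt h)]
    simp [runScan]


-- A's loop appends exactly the first occurrences of the characters that pass the count test.
theorem foldA_eq (n : Nat) (s : List Char) (l acc : List Char) :
    l.foldl (fun ys question =>
      if !(ys.contains question) then
        if n == PySem.List.count s question then ys ++ [question] else ys
      else ys) acc
    = acc ++ (PySem.Set.ofList l).filter
        (fun c => (n == PySem.List.count s c) && !(acc.contains c)) := by
  induction l generalizing acc with
  | nil => simp [PySem.Set.ofList_nil]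
  | cons c t ih =>
    rw [PySem.Set.ofList_cons]
    simp only [List.foldl_cons, PySem.Set.discard]
    by_cases hc : acc.contains c = true
    · have hm : c ∈ acc := List.mem_of_elem_eq_true hc
      rw [if_neg (by simpa using hm), ih]
      rw [List.filter_cons_of_neg (by simpa using fun _ => hm), List.filter_filter]
      congr 1
      apply List.filter_congr
      intro x _
      by_cases hx : x = c
      · subst hx; simpa using fun _ => hm
      · simp [hx]
    · have hc' : acc.contains c = false := by simpa using hc
      have hm : c ∉ acc := by simpa using hc'
      by_cases hp : (n == PySem.List.count s c) = true
      · have hcount : n = List.count c s := by simpa using hp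
        rw [if_pos (by simpa using hm), if_pos hp, ih]
        rw [List.filter_cons_of_pos (by simpa using And.intro hcount hm), List.filter_filter]
        simp only [List.append_assoc, List.singleton_append]
        congr 2
        apply List.filter_congr
        intro x _
        by_cases hx : x = c
        · subst hx; simp
        · simp [hx]
      · have hq : ¬ n = List.count c s := by simpa using hp
        rw [if_pos (by simpa using hm), if_neg (by simpa using hq), ih]
        rw [List.filter_cons_of_neg (by simpa using fun h => absurd h hq), List.filter_filter]
        congr 1
        apply List.filter_congr
        intro x _
        by_cases hx : x = c
        · subst hx; simpa using fun h => absurd h hq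
        · simp [hx]

-- Set.add folds: untouched by elements already contained …
theorem foldl_add_of_contained (s : PySem.Set Char) (xs : List Char)
    (h : ∀ x ∈ xs, s.contains x = true) :
    xs.foldl PySem.Set.add s = s := by
  induction xs with
  | nil => rfl
  | cons x t ih =>
    simp only [List.foldl_cons, PySem.Set.add, h x (by simp)]
    exact ih (fun y hy => h y (by simp [hy]))

-- … and a head element distinct from everything later can be pulled out.
theorem foldl_add_cons (c : Char) (s : PySem.Set Char) (xs : List Char)
    (h : ∀ x ∈ xs, x ≠ c) :
    xs.foldl PySem.Set.add (c :: s) = c :: xs.foldl PySem.Set.add s := by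
  induction xs generalizing s with
  | nil => rfl
  | cons x t ih =>
    have hxc : x ≠ c := h x (by simp)
    have hcs : PySem.Set.contains (c :: s) x = PySem.Set.contains s x := by
      simp [PySem.Set.contains, hxc]
    simp only [List.foldl_cons, PySem.Set.add, hcs]
    by_cases hc : PySem.Set.contains s x = true
    · rw [if_pos hc, if_pos hc]
      exact ih s (fun y hy => h y (List.mem_cons_of_mem _ hy))
    · rw [if_neg hc, if_neg hc, List.cons_append]
      exact ih (s ++ [x]) (fun y hy => h y (List.mem_cons_of_mem _ hy))

-- in a sorted tail whose elements all dominate c, dropWhile (== c) contains no c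
theorem dropWhile_ne (c : Char) (t : List Char) (hle : ∀ x ∈ t, c ≤ x)
    (hpt : t.Pairwise (· ≤ ·)) : ∀ x ∈ t.dropWhile (fun x => x == c), x ≠ c := by
  intro x hx hxc
  rw [hxc] at hx
  have hne : t.dropWhile (fun x => x == c) ≠ [] := List.ne_nil_of_mem hx
  have hfalse : ((t.dropWhile (fun x => x == c)).head hne == c) = false :=
    List.head_dropWhile_not _ hne
  have hdc : (t.dropWhile (fun x => x == c)).head hne ≠ c := by simpa using hfalse
  have hdt : (t.dropWhile (fun x => x == c)).head hne ∈ t :=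
    (List.dropWhile_sublist _).subset (List.head_mem hne)
  have hcd : c < (t.dropWhile (fun x => x == c)).head hne :=
    lt_of_le_of_ne (hle _ hdt) (Ne.symm hdc)
  have hpw : (t.dropWhile (fun x => x == c)).Pairwise (· ≤ ·) :=
    hpt.sublist (List.dropWhile_sublist _)
  rw [← List.cons_head_tail hne] at hpw hx
  rcases List.mem_cons.1 hx with h | h
  · exact hdc h.symm
  · exact absurd ((List.pairwise_cons.1 hpw).1 c h) (not_le.2 hcd)

-- Run scan on a sorted list = number of distinct characters whose frequency is n.
theorem runScan_eq (n : Nat) (l : List Char) (hl : l.Pairwise (· ≤ ·)) :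
    runScan n l
      = (((PySem.Set.ofList l).filter (fun c => n == PySem.List.count l c)).length : Int) := by
  induction hlen : l.length using Nat.strong_induction_on generalizing l with
  | _ m ih =>
  match l, hl with
  | [], _ => simp [runScan, PySem.Set.ofList_nil]
  | c :: t, hl =>
    have hle : ∀ x ∈ t, c ≤ x := (List.pairwise_cons.1 hl).1
    have hpt : t.Pairwise (· ≤ ·) := (List.pairwise_cons.1 hl).2
    obtain ⟨t₁, t₂, e₁, e₂⟩ : ∃ t₁ t₂, t.takeWhile (fun x => x == c) = t₁ ∧
        t.dropWhile (fun x => x == c) = t₂ := ⟨_, _, rfl, rfl⟩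
    have hsplit : t = t₁ ++ t₂ := by rw [← e₁, ← e₂, List.takeWhile_append_dropWhile]
    have h1 : ∀ x ∈ t₁, x = c := by
      intro x hx
      rw [← e₁] at hx
      simpa using List.mem_takeWhile_imp hx
    have h2 : ∀ x ∈ t₂, x ≠ c := by
      intro x hx
      rw [← e₂] at hx
      exact dropWhile_ne c t hle hpt x hx
    have hp2 : t₂.Pairwise (· ≤ ·) := by
      rw [← e₂]; exact hpt.sublist (List.dropWhile_sublist _)
    have hlen2 : t₂.length ≤ t.length := by
      rw [← e₂]; exact List.length_dropWhile_le _ _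
    have hcount_c : List.count c (c :: t) = t₁.length + 1 := by
      have f1 : List.count c t₁ = t₁.length :=
        List.count_eq_length.2 (fun x hx => (h1 x hx).symm)
      have f2 : List.count c t₂ = 0 :=
        List.count_eq_zero.2 (fun hmem => h2 c hmem rfl)
      rw [List.count_cons_self, hsplit, List.count_append, f1, f2]
    have hcount_x : ∀ x, x ≠ c → List.count x (c :: t) = List.count x t₂ := by
      intro x hx
      have f1 : List.count x t₁ = 0 :=
        List.count_eq_zero.2 (fun hmem => hx (h1 x hmem))
      rw [List.count_cons, hsplit, List.count_append, f1]
      simp [Ne.symm hx]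
    have hset : PySem.Set.ofList (c :: t) = c :: PySem.Set.ofList t₂ := by
      rw [PySem.Set.ofList_eq_foldl, hsplit]
      simp only [List.foldl_cons, List.foldl_append]
      have hadd : PySem.Set.add ([] : PySem.Set Char) c = [c] := rfl
      rw [hadd, foldl_add_of_contained [c] t₁ (by intro x hx; simp [h1 x hx]),
        foldl_add_cons c [] t₂ h2, ← PySem.Set.ofList_eq_foldl]
    have hIH := ih t₂.length (by simp only [List.length_cons] at hlen; omega) t₂ hp2 rfl
    have hfc : ((PySem.Set.ofList t₂).filter (fun x => n == PySem.List.count (c :: t) x))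
        = ((PySem.Set.ofList t₂).filter (fun x => n == PySem.List.count t₂ x)) := by
      apply List.filter_congr
      intro x hx
      have hxc : x ≠ c := h2 x ((PySem.Set.mem_ofList _ _).1 hx)
      simp only [PySem.List.count_eq, hcount_x x hxc]
    rw [runScan, e₁, e₂, hIH, hset, List.filter_cons, hfc]
    simp only [PySem.List.count_eq, hcount_c]
    by_cases hn : t₁.length + 1 = n
    · have hb1 : (t₁.length + 1 == n) = true := by simp; omega
      have hb2 : (n == t₁.length + 1) = true := by simp; omega
      simp only [hb1, hb2, if_true, List.length_cons]
      push_cast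
      omega
    · have hb1 : (t₁.length + 1 == n) = false := by simp; omega
      have hb2 : (n == t₁.length + 1) = false := by simp; omega
      simp [hb1, hb2]

-- transfer the A-side filtered-set length from s to its sorted rearrangement
theorem filter_ofList_length_perm (p : Char → Bool) (l₁ l₂ : List Char) (h : l₁.Perm l₂) :
    ((PySem.Set.ofList l₁).filter p).length = ((PySem.Set.ofList l₂).filter p).length := by
  have hperm : (PySem.Set.ofList l₁).Perm (PySem.Set.ofList l₂) := by
    rw [List.perm_ext_iff_of_nodup (PySem.Set.nodup_ofList _) (PySem.Set.nodup_ofList _)]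
    intro a
    simp only [PySem.Set.mem_ofList]
    exact h.mem_iff
  exact (hperm.filter p).length_eq

-- ===== VERDICT (by name: the statement is the Claim_ definition above) =====
theorem getYesResponses_spec : Claim_equal_getYesResponses := by
  intro answers _
  unfold Spec_getYesResponses getYesResponses getYesResponses_alt
  simp only []
  set s := (PySem.Str.join "" answers).toList with hs
  set n := answers.length with hn
  set l := PySem.List.sorted s (fun x => x) false with hldef
  have hperm : l.Perm s := PySem.List.sorted_perm s (fun x => x) false
  have hpw : l.Pairwise (· ≤ ·) := by
    have := PySem.List.sorted_pairwise (xs := s) (key := fun x => x)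
    simpa using this
  have halt : scanFrom l n 0 = runScan n l := by rw [scanFrom_eq]; simp
  rw [foldA_eq n s s [], halt, runScan_eq n l hpw]
  simp only [List.nil_append, List.contains_nil, Bool.not_false, Bool.and_true]
  have hc : ∀ x, PySem.List.count l x = PySem.List.count s x := by
    intro x; simp [PySem.List.count_eq, hperm.count_eq]
  have hfilter : ((PySem.Set.ofList l).filter (fun c => n == PySem.List.count l c))
      = ((PySem.Set.ofList l).filter (fun c => n == PySem.List.count s c)) := by
    apply List.filter_congr; intro x _; rw [hc]
  rw [hfilter, filter_ofList_length_perm _ l s hperm]
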